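-- pv_equiv track=rewrite | github.com/Notnec/Elementary-Quantum-Epidemic-Process | For collating datafiles/Stationary/Processing_PD_files.py | write_numlist_excluding_some
-- ===== SOURCE A (Python) =====
-- def write_numlist_excluding_some(list_length, to_exclude_list):
--     counter1 = 1
--     auxlist = []
--     while len(auxlist) < list_length:
--         if not counter1 in to_exclude_list:
--             auxlist.append(counter1)
--         counter1 += 1
--     return auxlist
-- ===== SOURCE B (Python) =====
-- def write_numlist_excluding_some(list_length, to_exclude_list):
--     excluded = set(to_exclude_list)
--     m = max(list_length, 0)
--     # among 1..m+len(excluded) at most len(excluded) values are excluded,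
--     # so at least m survive; one bounded pass, then cut to exactly m.
--     n = m + len(excluded)
--     return [x for x in range(1, n + 1) if x not in excluded][:m]
-- ===== Notes on version B (the rewrite author's own statement) =====
-- stated objective: faster
-- what changed: Replaces the unbounded grow-until-count loop with a per-element list membership test by a precomputed set and a single bounded pass over range(1, m+len(set)+1) (a provable upper bound), then a slice to exactly m elements.
import Mathlib
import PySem

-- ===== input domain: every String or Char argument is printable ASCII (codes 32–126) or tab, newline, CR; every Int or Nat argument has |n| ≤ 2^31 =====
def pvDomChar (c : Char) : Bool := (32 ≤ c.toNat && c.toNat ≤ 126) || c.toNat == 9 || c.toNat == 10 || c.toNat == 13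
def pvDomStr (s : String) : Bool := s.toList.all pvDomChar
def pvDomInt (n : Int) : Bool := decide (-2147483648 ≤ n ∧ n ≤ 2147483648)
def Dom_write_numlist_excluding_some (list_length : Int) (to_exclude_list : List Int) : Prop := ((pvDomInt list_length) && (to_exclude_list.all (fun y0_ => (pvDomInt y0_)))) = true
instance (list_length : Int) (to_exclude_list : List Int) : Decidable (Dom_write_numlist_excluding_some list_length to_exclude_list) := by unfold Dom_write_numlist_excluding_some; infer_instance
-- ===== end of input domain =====

-- B replaces A's unbounded grow-until-count while-loop (a linear membership scan per candidate)
-- by one bounded filtered pass over an explicit range plus a slice (objective: faster).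

-- ===== PORT A =====
-- the while loop of A: 'while len(auxlist) < list_length: if not counter1 in …: append; counter1 += 1'.
-- fuel is only a totality guard: max(list_length,0) + #distinct excluded values always suffices
-- (each iteration either appends a fresh survivor or skips a distinct excluded value).
def wnesLoop (fuel : Nat) (list_length : Int) (ex : List Int) (counter1 : Int)
    (aux : List Int) : List Int :=
  match fuel with
  | 0 => aux
  | fuel + 1 =>
    if (aux.length : Int) < list_length then
      if !(ex.contains counter1) then
        wnesLoop fuel list_length ex (counter1 + 1) (aux ++ [counter1])
      else
        wnesLoop fuel list_length ex (counter1 + 1) aux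
    else aux

def write_numlist_excluding_some (list_length : Int) (to_exclude_list : List Int) : List Int :=
  wnesLoop ((max list_length 0).toNat + (PySem.List.dedup to_exclude_list).length)
    list_length to_exclude_list 1 []

-- ===== PORT B =====
def write_numlist_excluding_some_alt (list_length : Int) (to_exclude_list : List Int) : List Int :=
  let excluded : PySem.Set Int := PySem.Set.ofList to_exclude_list
  let m : Int := max list_length 0
  let n : Int := m + (excluded.length : Int)
  PySem.List.slice ((PySem.List.pyRange 1 (n + 1) 1).filter (fun x => !excluded.contains x))
    none (some m)

-- ===== PRECONDITION & SPEC =====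
def Spec_write_numlist_excluding_some (list_length : Int) (to_exclude_list : List Int) (out : List Int) : Prop := out = write_numlist_excluding_some_alt list_length to_exclude_list
instance (list_length : Int) (to_exclude_list : List Int) (out : List Int) : Decidable (Spec_write_numlist_excluding_some list_length to_exclude_list out) := by unfold Spec_write_numlist_excluding_some; infer_instance

-- ===== CLAIM (what is proved, stated in full; the proofs are below) =====
def Claim_equal_write_numlist_excluding_some : Prop := ∀ (list_length : Int) (to_exclude_list : List Int), Dom_write_numlist_excluding_some list_length to_exclude_list → Spec_write_numlist_excluding_some list_length to_exclude_list (write_numlist_excluding_some list_length to_exclude_list)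

-- ===== LEMMAS AND PROOFS =====

-- a nodup list contained in a nodup list is no longer
theorem wnes_nodup_sub (l s : List Int) (h1 : l.Nodup) (h2 : l ⊆ s) (h3 : s.Nodup) :
    l.length ≤ s.length := by
  have hsub : l.toFinset ⊆ s.toFinset := by
    intro x hx; simp only [List.mem_toFinset] at hx ⊢; exact h2 hx
  have := Finset.card_le_card hsub
  rwa [List.toFinset_card_of_nodup h1, List.toFinset_card_of_nodup h3] at this

-- membership in set(to_exclude_list) agrees with membership in the raw list
theorem wnes_contains_ofList (xs : List Int) (x : Int) :
    (PySem.Set.ofList xs).contains x = xs.contains x := by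
  rw [Bool.eq_iff_iff]
  simp only [pysem, List.contains_iff_mem]

-- A's loop returns aux ++ the next needed survivors, read off any range long enough to hold them
theorem wnesLoop_eq (L : Int) (ex : List Int) :
    ∀ (len : Nat) (c : Int) (aux : List Int),
    (L - (aux.length : Int)).toNat ≤
      ((PySem.List.pyRange c (c + (len : Int)) 1).filter (fun x => !ex.contains x)).length →
    wnesLoop len L ex c aux =
      aux ++ ((PySem.List.pyRange c (c + (len : Int)) 1).filter (fun x => !ex.contains x)).take
        (L - (aux.length : Int)).toNat := by
  intro len
  induction len with
  | zero =>
    intro c aux h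
    rw [PySem.List.pyRange_one_eq_nil (by omega)] at h ⊢
    simp only [List.filter_nil, List.length_nil, Nat.le_zero] at h
    simp [wnesLoop, h]
  | succ len ih =>
    intro c aux h
    have hcons : PySem.List.pyRange c (c + ((len + 1 : Nat) : Int)) 1 =
        c :: PySem.List.pyRange (c + 1) ((c + 1) + (len : Int)) 1 := by
      rw [show c + ((len + 1 : Nat) : Int) = (c + 1) + (len : Int) by push_cast; ring]
      exact PySem.List.pyRange_one_cons (by omega)
    rw [hcons] at h ⊢
    by_cases hstop : L ≤ (aux.length : Int)
    · rw [wnesLoop, if_neg (by omega)]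
      rw [show (L - (aux.length : Int)).toNat = 0 by omega]
      simp
    · rw [wnesLoop, if_pos (by omega)]
      rw [List.filter_cons] at h ⊢
      cases hc : ex.contains c with
      | true =>
        simp only [hc, Bool.not_true, Bool.false_eq_true, if_false] at h ⊢
        exact ih (c + 1) aux h
      | false =>
        simp only [hc, Bool.not_false, if_true] at h ⊢
        have ht : 0 < (L - (aux.length : Int)).toNat := by omega
        have hlen' : (L - ((aux ++ [c]).length : Int)).toNat =
            (L - (aux.length : Int)).toNat - 1 := by
          simp only [List.length_append, List.length_cons, List.length_nil]
          omega
        have hh : (L - ((aux ++ [c]).length : Int)).toNat ≤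
            ((PySem.List.pyRange (c + 1) ((c + 1) + (len : Int)) 1).filter
              (fun x => !ex.contains x)).length := by
          rw [hlen']
          simp only [List.length_cons] at h
          omega
        rw [ih (c + 1) (aux ++ [c]) hh, hlen']
        rw [show (L - (aux.length : Int)).toNat =
            ((L - (aux.length : Int)).toNat - 1) + 1 by omega]
        rw [List.take_succ_cons, List.append_assoc, List.singleton_append]
        simp only [show (L - (aux.length : Int)).toNat - 1 + 1 - 1 =
          (L - (aux.length : Int)).toNat - 1 from by omega]

-- ===== VERDICT (by name: the statement is the Claim_ definition above) =====
theorem write_numlist_excluding_some_spec : Claim_equal_write_numlist_excluding_some := by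
  intro L ex _
  unfold Spec_write_numlist_excluding_some
  unfold write_numlist_excluding_some write_numlist_excluding_some_alt
  simp only []
  rw [PySem.List.dedup_eq_ofList]
  -- the two filter predicates agree
  rw [show (fun x => !(PySem.Set.ofList ex).contains x) = (fun x => !ex.contains x) by
    funext x; rw [wnes_contains_ofList]]
  set k : Nat := (PySem.Set.ofList ex).length with hk
  set m : Int := max L 0 with hm
  set n : Int := m + (k : Int) with hn
  -- B's slice [:m] is take m
  rw [PySem.List.slice_to _ (show (0 : Int) ≤ m by omega)]
  -- range(1, n+1) holds at least m survivors
  have hbound : m.toNat ≤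
      ((PySem.List.pyRange 1 (n + 1) 1).filter (fun x => !ex.contains x)).length := by
    have hsplit := List.length_eq_length_filter_add
      (l := PySem.List.pyRange 1 (n + 1) 1) (fun x => ex.contains x)
    simp only [] at hsplit
    have hlenR : (PySem.List.pyRange 1 (n + 1) 1).length = (n + 1 - 1).toNat :=
      PySem.List.length_pyRange_one 1 (n + 1)
    have hexc : ((PySem.List.pyRange 1 (n + 1) 1).filter (fun x => ex.contains x)).length ≤ k := by
      apply wnes_nodup_sub _ _ (List.Nodup.filter _ (PySem.List.nodup_pyRange_one 1 (n + 1)))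
        _ (PySem.Set.nodup_ofList ex)
      intro x hx
      exact (PySem.Set.mem_ofList ex x).mpr (by simpa using (List.mem_filter.mp hx).2)
    omega
  have hfin := wnesLoop_eq L ex n.toNat 1 []
  rw [show (1 : Int) + (n.toNat : Int) = n + 1 by omega] at hfin
  rw [show m.toNat + k = n.toNat by omega]
  rw [hfin (by
    simp only [List.length_nil, Nat.cast_zero]
    have := hbound
    omega)]
  simp only [List.nil_append, List.length_nil, Nat.cast_zero]
  congr 1
  omega
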